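-- pv_equiv track=rewrite | github.com/TEX479/QED | QED_system.py | _key_bit
-- ===== SOURCE A (Python) =====
-- def _key_bit(key:list[int], bit:int) -> bool:
--     bit = bit % sum(key)
--     key_bit = True
--     for i in range(len(key)):
--         if bit < key[i]:
--             return key_bit
--         key_bit = not key_bit
--         bit -= key[i]
--
--     raise ValueError("this should not be possible.")
-- ===== SOURCE B (Python) =====
-- def _key_bit(key: list[int], bit: int) -> bool:
--     bit %= sum(key)
--     cum, t = [], 0
--     for k in key:
--         t += k
--         cum.append(t)
--     return [bit < c for c in cum].index(True) % 2 == 0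
-- ===== Notes on version B (the rewrite author's own statement) =====
-- stated objective: alternative
-- what changed: Replaces the remainder-subtracting, parity-toggling scan by building the cumulative-sum list once and returning the parity of the index of the first prefix sum exceeding bit (via list.index on a boolean map), with no mutable toggle or remainder.
import Mathlib
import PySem

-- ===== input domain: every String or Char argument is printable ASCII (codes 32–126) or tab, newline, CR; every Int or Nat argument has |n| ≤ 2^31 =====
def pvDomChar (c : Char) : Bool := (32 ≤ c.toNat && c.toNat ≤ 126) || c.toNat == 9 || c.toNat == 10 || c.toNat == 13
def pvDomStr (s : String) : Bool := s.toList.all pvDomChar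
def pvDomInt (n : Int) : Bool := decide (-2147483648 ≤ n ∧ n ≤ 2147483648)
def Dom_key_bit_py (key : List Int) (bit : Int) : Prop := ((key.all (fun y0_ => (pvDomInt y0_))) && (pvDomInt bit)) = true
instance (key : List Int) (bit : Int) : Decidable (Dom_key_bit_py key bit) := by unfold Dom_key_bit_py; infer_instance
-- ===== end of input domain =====

-- B builds the cumulative-sum list and returns the parity of the first index whose prefix sum
-- exceeds bit, instead of A's remainder-subtracting parity-toggling scan; same O(n) cost.


-- ===== PORT A =====
-- A's loop: carries the shrinking remainder `bit` and the toggled flag `key_bit`;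
-- `none` is where the loop falls off the end and Python raises ValueError (excluded by Pre_).
def keyBitGoA : List Int → Int → Bool → Option Bool
  | [], _, _ => none
  | k :: rest, bit, kb => if bit < k then some kb else keyBitGoA rest (bit - k) (!kb)

def key_bit_py (key : List Int) (bit : Int) : Bool :=
  let b := PySem.Int.mod bit key.sum   -- bit = bit % sum(key); sum(key) = 0 raises, excluded by Pre_
  (keyBitGoA key b true).getD false    -- getD false only on the raising inputs excluded by Pre_

-- ===== PORT B =====
def key_bit_py_alt (key : List Int) (bit : Int) : Bool :=
  let b := PySem.Int.mod bit key.sum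
  -- cum, t = [], 0; for k in key: t += k; cum.append(t)
  let cum := (key.foldl (fun (st : List Int × Int) k => (st.1 ++ [st.2 + k], st.2 + k)) (([] : List Int), (0 : Int))).1
  -- [bit < c for c in cum].index(True) % 2 == 0 ; .index raising ValueError is excluded by Pre_
  match PySem.List.index? (cum.map (fun c => decide (b < c))) true with
  | some n => decide (n % 2 = 0)
  | none => false

-- ===== PRECONDITION & SPEC =====
-- Pre_ excludes exactly the inputs where the Python A raises: sum(key) == 0 (ZeroDivisionError)
-- and keys where no prefix sum ever exceeds bit % sum(key) (A's explicit ValueError); B raises there too.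
def Pre_key_bit_py (key : List Int) (bit : Int) : Prop :=
  key.sum ≠ 0 ∧ ∃ i < key.length, PySem.Int.mod bit key.sum < (key.take (i + 1)).sum
instance (key : List Int) (bit : Int) : Decidable (Pre_key_bit_py key bit) := by unfold Pre_key_bit_py; infer_instance

def pvWitness_key_bit_py : List Int × Int := ([1, 2], 0)

def Spec_key_bit_py (key : List Int) (bit : Int) (out : Bool) : Prop := out = key_bit_py_alt key bit
instance (key : List Int) (bit : Int) (out : Bool) : Decidable (Spec_key_bit_py key bit out) := by unfold Spec_key_bit_py; infer_instance

-- ===== CLAIM (what is proved, stated in full; the proofs are below) =====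
def Claim_equal_key_bit_py : Prop := ∀ (key : List Int) (bit : Int), Dom_key_bit_py key bit → Pre_key_bit_py key bit → Spec_key_bit_py key bit (key_bit_py key bit)

-- ===== LEMMAS AND PROOFS =====

-- reference: index of the first prefix sum of `key` that exceeds `b`
def firstCross : List Int → Int → Option Nat
  | [], _ => none
  | k :: rest, b => if b < k then some 0 else (firstCross rest (b - k)).map (· + 1)

-- absolute cumulative sums of `key` starting from accumulator `t`
def cumList : List Int → Int → List Int
  | [], _ => []
  | k :: rest, t => (t + k) :: cumList rest (t + k)

theorem keyBitGoA_eq (key : List Int) : ∀ (b : Int) (kb : Bool),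
    keyBitGoA key b kb = (firstCross key b).map (fun n => xor kb (decide (n % 2 = 1))) := by
  induction key with
  | nil => intro b kb; rfl
  | cons k rest ih =>
    intro b kb
    simp only [keyBitGoA, firstCross]
    split
    · simp
    · rw [ih (b - k) (!kb), Option.map_map]
      congr 1
      funext n
      have : (n + 1) % 2 = 1 ↔ ¬ n % 2 = 1 := by omega
      cases hkb : kb <;> by_cases hn : n % 2 = 1 <;>
        simp [hn, this]

theorem foldl_cum (key : List Int) : ∀ (acc : List Int) (t : Int),
    (key.foldl (fun (st : List Int × Int) k => (st.1 ++ [st.2 + k], st.2 + k)) (acc, t)) =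
      (acc ++ cumList key t, t + key.sum) := by
  induction key with
  | nil => intro acc t; simp [cumList]
  | cons k rest ih =>
    intro acc t
    simp only [List.foldl_cons, ih, cumList, List.sum_cons]
    rw [Prod.mk.injEq]
    exact ⟨by simp, by ring⟩

theorem index?_cum (key : List Int) : ∀ (t b : Int),
    PySem.List.index? ((cumList key t).map (fun c => decide (b < c))) true =
      firstCross key (b - t) := by
  induction key with
  | nil => intro t b; rfl
  | cons k rest ih =>
    intro t b
    simp only [cumList, List.map_cons, firstCross]
    by_cases h : b < t + k
    · have hb : b - t < k := by omega
      have hd : decide (b < t + k) = true := by simp [h]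
      rw [hd, PySem.List.index?_cons_self]
      simp [hb]
    · have hb : ¬ b - t < k := by omega
      rw [PySem.List.index?_cons_of_ne _ (by simp [h] : decide (b < t + k) ≠ true),
        ih (t + k) b]
      have hsub : b - (t + k) = b - t - k := by ring
      simp [hb, hsub]

-- ===== VERDICT (by name: the statement is the Claim_ definition above) =====
theorem key_bit_py_spec : Claim_equal_key_bit_py := by
  intro key bit _ _
  show key_bit_py key bit = key_bit_py_alt key bit
  simp only [key_bit_py, key_bit_py_alt, foldl_cum key [] 0, keyBitGoA_eq, List.nil_append]
  rw [index?_cum key 0 (PySem.Int.mod bit key.sum)]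
  rw [show PySem.Int.mod bit key.sum - 0 = PySem.Int.mod bit key.sum from by ring]
  cases h : firstCross key (PySem.Int.mod bit key.sum) with
  | none => rfl
  | some n =>
    simp only [Option.map_some, Option.getD_some]
    by_cases hn : n % 2 = 1 <;> simp [hn]
    omega
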